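-- pv_equiv track=rewrite | github.com/james-sungjae-lee/2018_DigitalLogicDesign | RegularExpressionFSM/PythonTest/test3.py | stateAB
-- ===== SOURCE A (Python) =====
-- def stateAB(regex):
--     event = regex[0]
--     regex = regex[1:]
--     if event == 'a':
--         return stateAB(regex)
--     elif event == 'b':
--         return stateB(regex)
--     elif not regex:
--         return 0
--     else :
--         return 0
--
-- def stateB(regex):
--     if regex:
--         return 0
--     else:
--         return 1
-- ===== SOURCE B (Python) =====
-- def stateAB(regex):
--     i = 0
--     while regex[i] == 'a':   # raises IndexError exactly where A does (empty / all-'a' input)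
--         i += 1
--     if regex[i] == 'b':
--         return 1 if i == len(regex) - 1 else 0
--     return 0
-- ===== Notes on version B (the rewrite author's own statement) =====
-- stated objective: faster
-- what changed: Replaces A's mutual recursion (stateAB/stateB with a fresh regex[1:] slice per call) by a single iterative index scan over the leading run of 'a', deciding the 'b' case by comparing the index with len-1; both raise IndexError on the same inputs (empty or all-'a' strings), which Pre_ excludes.
import Mathlib
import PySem

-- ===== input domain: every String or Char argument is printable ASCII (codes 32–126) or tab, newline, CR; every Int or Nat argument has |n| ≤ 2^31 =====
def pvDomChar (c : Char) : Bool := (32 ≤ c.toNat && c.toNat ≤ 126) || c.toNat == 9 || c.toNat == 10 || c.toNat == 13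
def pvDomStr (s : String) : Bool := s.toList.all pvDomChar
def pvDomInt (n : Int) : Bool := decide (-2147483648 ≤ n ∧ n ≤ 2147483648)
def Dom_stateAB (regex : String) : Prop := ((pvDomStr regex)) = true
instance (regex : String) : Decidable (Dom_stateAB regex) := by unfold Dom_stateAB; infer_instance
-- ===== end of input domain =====

-- B replaces A's mutual recursion with slicing by one iterative index scan of the 'a'-prefix (objective: simpler).
-- ===== PORT A =====
-- A's helper stateB: returns 0 on a nonempty rest, 1 on the empty rest.
def stateBPort (regex : List Char) : Int :=
  if regex ≠ [] then 0 else 1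

-- A's recursion on the string; the [] case is where Python raises IndexError (excluded by Pre_).
def stateABList : List Char → Int
  | [] => 0            -- regex[0] raises IndexError here; outside Pre_stateAB
  | event :: regex =>
    if event = 'a' then stateABList regex
    else if event = 'b' then stateBPort regex
    else if regex = [] then 0
    else 0

def stateAB (regex : String) : Int := stateABList regex.toList

-- ===== PORT B =====
-- B's while loop over an index i; the out-of-range case is Python's IndexError (excluded by Pre_).
def stateABAltLoop (l : List Char) (i : Nat) : Int :=
  if h : i < l.length then
    if l[i] = 'a' then stateABAltLoop l (i + 1)
    else if l[i] = 'b' then (if i = l.length - 1 then 1 else 0)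
    else 0
  else 0               -- regex[i] raises IndexError here; outside Pre_stateAB
termination_by l.length - i

def stateAB_alt (regex : String) : Int := stateABAltLoop regex.toList 0

-- ===== PRECONDITION & SPEC =====
-- Pre_ excludes exactly the inputs where A (and B) raise IndexError: the empty string and all-'a' strings.
def Pre_stateAB (regex : String) : Prop := (regex.toList.any (fun c => c ≠ 'a')) = true
instance (regex : String) : Decidable (Pre_stateAB regex) := by unfold Pre_stateAB; infer_instance
def pvWitness_stateAB : String := "aab"

def Spec_stateAB (regex : String) (out : Int) : Prop := out = stateAB_alt regex
instance (regex : String) (out : Int) : Decidable (Spec_stateAB regex out) := by unfold Spec_stateAB; infer_instance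

-- ===== CLAIM (what is proved, stated in full; the proofs are below) =====
def Claim_equal_stateAB : Prop := ∀ (regex : String), Dom_stateAB regex → Pre_stateAB regex → Spec_stateAB regex (stateAB regex)

-- ===== LEMMAS AND PROOFS =====

-- Loop invariant: at index i, B's loop computes A's recursion on the suffix `l.drop i`,
-- provided that suffix still contains a non-'a' character.
theorem stateAB_loop_eq (l : List Char) (i : Nat)
    (hne : (l.drop i).any (fun c => c ≠ 'a') = true) :
    stateABList (l.drop i) = stateABAltLoop l i := by
  have hi : i < l.length := by
    by_contra h
    have : l.drop i = [] := List.drop_eq_nil_of_le (by omega)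
    simp [this] at hne
  have hdrop : l.drop i = l[i] :: l.drop (i + 1) :=
    List.drop_eq_getElem_cons hi
  rw [stateABAltLoop]
  simp only [hi, dif_pos]
  by_cases ha : l[i] = 'a'
  · have hne' : (l.drop (i + 1)).any (fun c => c ≠ 'a') = true := by
      rw [hdrop] at hne
      simp [ha] at hne
      simpa using hne
    rw [hdrop, ha]
    simp only [stateABList]
    exact stateAB_loop_eq l (i + 1) hne'
  · rw [hdrop]
    simp only [stateABList, if_neg ha]
    by_cases hb : l[i] = 'b'
    · simp only [hb, stateBPort]
      have hempty : l.drop (i + 1) = [] ↔ i = l.length - 1 := by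
        constructor
        · intro h
          have := List.drop_eq_nil_iff.mp h
          omega
        · intro h
          exact List.drop_eq_nil_of_le (by omega)
      by_cases he : l.drop (i + 1) = []
      · simp [hempty.mp he]
        omega
      · have : ¬ i = l.length - 1 := fun h => he (hempty.mpr h)
        simp [he, this]
    · simp only [hb, ite_self]
      simp
termination_by l.length - i

-- ===== VERDICT (by name: the statement is the Claim_ definition above) =====
theorem stateAB_spec : Claim_equal_stateAB := by
  intro regex _ hpre
  unfold Spec_stateAB stateAB stateAB_alt
  have := stateAB_loop_eq regex.toList 0 (by rw [List.drop_zero]; exact hpre)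
  simpa using this
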